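-- pv_equiv track=rewrite | github.com/FrelVick/CombiProj | GrammarsC.py | sep_dyck
-- ===== SOURCE A (Python) =====
-- def sep_dyck (s):
--     i_lpar = 0
--     count = 0
--     for i in range(len(s)):
--         if s[i] == "(" and count == 0:
--             i_lpar = i
--             count += 1
--         elif s[i] == "(":
--             count += 1
--         else:
--             count -= 1
--     return (s[:i_lpar], s[i_lpar:])
-- ===== SOURCE B (Python) =====
-- def sep_dyck(s):
--     total = 0
--     for c in s:
--         total += 1 if c == "(" else -1
--     bal = total
--     i_lpar = 0
--     for i in range(len(s) - 1, -1, -1):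
--         bal -= 1 if s[i] == "(" else -1
--         if s[i] == "(" and bal == 0:
--             i_lpar = i
--             break
--     return (s[:i_lpar], s[i_lpar:])
-- ===== Notes on version B (the rewrite author's own statement) =====
-- stated objective: alternative
-- what changed: Instead of A's full left-to-right pass that keeps overwriting the split index, B computes the total balance once and scans right-to-left with the running prefix balance, returning at the first (i.e. last) position where '(' is seen at balance 0, with an early break.
import Mathlib
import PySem

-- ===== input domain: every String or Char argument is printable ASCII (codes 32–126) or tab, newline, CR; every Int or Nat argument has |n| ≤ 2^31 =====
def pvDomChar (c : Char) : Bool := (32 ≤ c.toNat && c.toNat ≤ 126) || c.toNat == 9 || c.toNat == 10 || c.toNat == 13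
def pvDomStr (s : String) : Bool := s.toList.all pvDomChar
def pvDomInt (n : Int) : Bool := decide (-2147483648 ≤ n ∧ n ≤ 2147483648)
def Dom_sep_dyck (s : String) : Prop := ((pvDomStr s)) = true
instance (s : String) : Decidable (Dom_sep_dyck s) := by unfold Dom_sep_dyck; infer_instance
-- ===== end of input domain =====

-- B changes the decomposition: A overwrites the split index in one left-to-right pass;
-- B computes the total balance and finds the last outermost '(' by a right-to-left scan
-- with early exit ("alternative", same O(n) cost).

-- ===== PORT A =====
-- 'for i in range(len(s))' reading s[i] is ported as a fold over the enumerated characters.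
def sep_dyck (s : String) : String × String :=
  let st := (PySem.List.enumerate s.toList 0).foldl
    (fun (st : Int × Int) ic =>
      if ic.2 = '(' ∧ st.2 = 0 then (ic.1, st.2 + 1)
      else if ic.2 = '(' then (st.1, st.2 + 1)
      else (st.1, st.2 - 1)) (0, 0)
  (PySem.Str.slice s none (some st.1), PySem.Str.slice s (some st.1) none)

-- ===== PORT B =====
-- the 'for i in range(len(s)-1, -1, -1)' loop with break: recursion over the reversed
-- character list; 'rest.length' is the original index of the current character.
def pvRevScan : List Char → Int → Int
  | [], _ => 0
  | c :: rest, bal =>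
    let bal' := bal - (if c = '(' then 1 else -1)
    if c = '(' ∧ bal' = 0 then (rest.length : Int) else pvRevScan rest bal'

def sep_dyck_alt (s : String) : String × String :=
  let total := s.toList.foldl (fun b c => b + (if c = '(' then 1 else -1)) 0
  let i := pvRevScan s.toList.reverse total
  (PySem.Str.slice s none (some i), PySem.Str.slice s (some i) none)

-- ===== PRECONDITION & SPEC =====
def Spec_sep_dyck (s : String) (out : String × String) : Prop := out = sep_dyck_alt s
instance (s : String) (out : String × String) : Decidable (Spec_sep_dyck s out) := by unfold Spec_sep_dyck; infer_instance

-- ===== CLAIM (what is proved, stated in full; the proofs are below) =====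
def Claim_equal_sep_dyck : Prop := ∀ (s : String), Dom_sep_dyck s → Spec_sep_dyck s (sep_dyck s)

-- ===== LEMMAS AND PROOFS =====

def pvStepA (st : Int × Int) (ic : Int × Char) : Int × Int :=
  if ic.2 = '(' ∧ st.2 = 0 then (ic.1, st.2 + 1)
  else if ic.2 = '(' then (st.1, st.2 + 1)
  else (st.1, st.2 - 1)

def pvBal (l : List Char) : Int := l.foldl (fun b c => b + (if c = '(' then 1 else -1)) 0

lemma pvKey (l : List Char) :
    (PySem.List.enumerate l 0).foldl pvStepA (0, 0) = (pvRevScan l.reverse (pvBal l), pvBal l) := by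
  induction l using List.reverseRecOn with
  | nil => simp [PySem.List.enumerate, pvRevScan, pvBal]
  | append_singleton l c ih =>
    have henum : PySem.List.enumerate (l ++ [c]) 0
        = PySem.List.enumerate l 0 ++ [((l.length : Int), c)] := by
      rw [PySem.List.enumerate_append]
      simp [PySem.List.enumerate_cons, PySem.List.enumerate_nil]
    have hbal : pvBal (l ++ [c]) = pvBal l + (if c = '(' then 1 else -1) := by
      simp [pvBal, List.foldl_append]
    rw [henum, List.foldl_append, ih, hbal]
    simp only [List.reverse_append, List.reverse_singleton, List.singleton_append, pvRevScan]
    have hbal' : pvBal l + (if c = '(' then 1 else -1) - (if c = '(' then 1 else -1) = pvBal l := by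
      ring
    rw [hbal']
    by_cases hc : c = '('
    · by_cases hb : pvBal l = 0 <;> simp [pvStepA, hc, hb]
    · simp [pvStepA, hc]
      ring

lemma pvFoldStep_eq (l : List Char) :
    (PySem.List.enumerate l 0).foldl
      (fun (st : Int × Int) ic =>
        if ic.2 = '(' ∧ st.2 = 0 then (ic.1, st.2 + 1)
        else if ic.2 = '(' then (st.1, st.2 + 1)
        else (st.1, st.2 - 1)) (0, 0)
    = (PySem.List.enumerate l 0).foldl pvStepA (0, 0) := rfl

-- ===== VERDICT (by name: the statement is the Claim_ definition above) =====
theorem sep_dyck_spec : Claim_equal_sep_dyck := by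
  intro s _
  show sep_dyck s = sep_dyck_alt s
  unfold sep_dyck sep_dyck_alt
  rw [pvFoldStep_eq, pvKey]
  rfl
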